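-- pv_equiv track=rewrite | github.com/tnndbtc/agent | novel_agent/modules/brainstorming.py | _parse_plot_ideas
-- ===== SOURCE A (Python) =====
-- from typing import List, Dict, Any, Optional
--
-- def _parse_plot_ideas(response_text: str) -> List[Dict[str, str]]:
--     """Parse LLM response into structured plot ideas."""
--     ideas = []
--     current_idea = {}
--
--     lines = response_text.split('\n')
--     for line in lines:
--         line = line.strip()
--
--         if line.startswith('Title:'):
--             if current_idea:
--                 ideas.append(current_idea)
--             current_idea = {'title': line.replace('Title:', '').strip()}
--         elif line.startswith('Premise:'):
--             current_idea['premise'] = line.replace('Premise:', '').strip()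
--         elif line.startswith('Conflict:'):
--             current_idea['conflict'] = line.replace('Conflict:', '').strip()
--         elif line.startswith('Hook:'):
--             current_idea['hook'] = line.replace('Hook:', '').strip()
--         elif 'premise' in current_idea and not line.startswith(('Title:', 'Conflict:', 'Hook:', 'IDEA', '---', '')):
--             # Continue multi-line premise
--             current_idea['premise'] += ' ' + line
--
--     if current_idea:
--         ideas.append(current_idea)
--
--     return ideas
-- ===== SOURCE B (Python) =====
-- from typing import List, Dict
--
-- _FIELDS = (('title', 'Title:'), ('premise', 'Premise:'),
--            ('conflict', 'Conflict:'), ('hook', 'Hook:'))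
--
--
-- def _parse_plot_ideas(response_text: str) -> List[Dict[str, str]]:
--     """Two-pass parse: split into Title-delimited blocks, then convert each block."""
--     lines = [line.strip() for line in response_text.split('\n')]
--
--     # Pass 1: group lines into blocks; a 'Title:' line starts a new block.
--     blocks = []
--     current = []
--     for line in lines:
--         if line.startswith('Title:'):
--             blocks.append(current)
--             current = [line]
--         else:
--             current.append(line)
--     blocks.append(current)
--
--     # Pass 2: each block becomes a dict (last occurrence of a field wins).
--     ideas = []
--     for block in blocks:
--         idea = {}
--         for line in block:
--             for key, prefix in _FIELDS:
--                 if line.startswith(prefix):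
--                     idea[key] = line.replace(prefix, '').strip()
--                     break
--         if idea:
--             ideas.append(idea)
--     return ideas
-- ===== Notes on version B (the rewrite author's own statement) =====
-- stated objective: alternative
-- what changed: Replaced A's single-pass loop that flushes the current dict on each 'Title:' line (with a dead multi-line-premise branch) by a two-pass decomposition: first segment the stripped lines into Title-delimited blocks, then convert each block to a dict via a data-driven field table, keeping non-empty dicts.
import Mathlib
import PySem

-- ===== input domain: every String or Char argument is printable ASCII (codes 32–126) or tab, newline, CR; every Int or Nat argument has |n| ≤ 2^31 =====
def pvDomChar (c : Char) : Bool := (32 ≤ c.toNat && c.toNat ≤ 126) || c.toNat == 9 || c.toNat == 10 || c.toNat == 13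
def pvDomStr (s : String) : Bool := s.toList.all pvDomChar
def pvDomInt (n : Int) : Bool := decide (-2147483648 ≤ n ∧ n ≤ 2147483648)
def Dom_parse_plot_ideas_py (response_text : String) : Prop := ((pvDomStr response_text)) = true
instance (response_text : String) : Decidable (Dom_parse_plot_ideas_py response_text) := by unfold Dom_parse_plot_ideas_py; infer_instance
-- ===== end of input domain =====

-- B replaces A's single-pass flush-on-'Title:' loop by a two-pass decomposition (group lines
-- into Title-delimited blocks, then convert each block via a field table); objective: alternative.

-- ===== PORT A =====
-- A's loop step on one (not yet stripped) line; state = (ideas, current_idea).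
def pvStepA (st : List (PySem.Dict String String) × PySem.Dict String String) (line0 : String) :
    List (PySem.Dict String String) × PySem.Dict String String :=
  let line := PySem.Str.strip line0
  if PySem.Str.startswith line "Title:" then
    ((if st.2.size ≠ 0 then st.1 ++ [st.2] else st.1),
     (PySem.Dict.empty).insert "title" (PySem.Str.strip (PySem.Str.replace line "Title:" "")))
  else if PySem.Str.startswith line "Premise:" then
    (st.1, st.2.insert "premise" (PySem.Str.strip (PySem.Str.replace line "Premise:" "")))
  else if PySem.Str.startswith line "Conflict:" then
    (st.1, st.2.insert "conflict" (PySem.Str.strip (PySem.Str.replace line "Conflict:" "")))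
  else if PySem.Str.startswith line "Hook:" then
    (st.1, st.2.insert "hook" (PySem.Str.strip (PySem.Str.replace line "Hook:" "")))
  else if st.2.contains "premise" &&
          !(PySem.Str.startswith line "Title:" || PySem.Str.startswith line "Conflict:" ||
            PySem.Str.startswith line "Hook:" || PySem.Str.startswith line "IDEA" ||
            PySem.Str.startswith line "---" || PySem.Str.startswith line "") then
    -- current_idea['premise'] += ' ' + line  (the guard ensures the key is present)
    (st.1, st.2.insert "premise" (st.2.getD "premise" "" ++ " " ++ line))
  else
    (st.1, st.2)

def parse_plot_ideas_py (response_text : String) : List (List (String × String)) :=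
  let lines := (PySem.Str.split? response_text "\n").getD []   -- sep "\n" ≠ "": split? is some
  let st := lines.foldl pvStepA ([], PySem.Dict.empty)
  (if st.2.size ≠ 0 then st.1 ++ [st.2] else st.1).map (fun d => d.items)

-- ===== PORT B =====
def pvFields : List (String × String) :=
  [("title", "Title:"), ("premise", "Premise:"), ("conflict", "Conflict:"), ("hook", "Hook:")]

-- the inner 'for key, prefix in _FIELDS: … break' loop
def pvApplyFields : List (String × String) → PySem.Dict String String → String → PySem.Dict String String
  | [], d, _ => d
  | (key, pfx) :: rest, d, line =>
    if PySem.Str.startswith line pfx then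
      d.insert key (PySem.Str.strip (PySem.Str.replace line pfx ""))
    else pvApplyFields rest d line

-- pass-1 step: group (already stripped) lines into blocks
def pvStepSeg (st : List (List String) × List String) (line : String) :
    List (List String) × List String :=
  if PySem.Str.startswith line "Title:" then (st.1 ++ [st.2], [line])
  else (st.1, st.2 ++ [line])

-- pass-2 body: convert one block to a dict, keep it if non-empty
def pvAddBlock (acc : List (List (String × String))) (block : List String) :
    List (List (String × String)) :=
  let idea := block.foldl (fun d line => pvApplyFields pvFields d line) PySem.Dict.empty
  if idea.size ≠ 0 then acc ++ [idea.items] else acc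

def parse_plot_ideas_py_alt (response_text : String) : List (List (String × String)) :=
  let lines := ((PySem.Str.split? response_text "\n").getD []).map PySem.Str.strip
  let st := lines.foldl pvStepSeg ([], [])
  let blocks := st.1 ++ [st.2]
  blocks.foldl pvAddBlock []

-- ===== PRECONDITION & SPEC =====
def Spec_parse_plot_ideas_py (response_text : String) (out : List (List (String × String))) : Prop := out = parse_plot_ideas_py_alt response_text
instance (response_text : String) (out : List (List (String × String))) : Decidable (Spec_parse_plot_ideas_py response_text out) := by unfold Spec_parse_plot_ideas_py; infer_instance

-- ===== CLAIM (what is proved, stated in full; the proofs are below) =====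
def Claim_equal_parse_plot_ideas_py : Prop := ∀ (response_text : String), Dom_parse_plot_ideas_py response_text → Spec_parse_plot_ideas_py response_text (parse_plot_ideas_py response_text)

-- ===== LEMMAS AND PROOFS =====

-- B's pass-1 step, precomposed with strip (B strips in its line comprehension)
def pvStepSeg' (st : List (List String) × List String) (line : String) :
    List (List String) × List String := pvStepSeg st (PySem.Str.strip line)

-- dict of a block of stripped lines
def pvBlkDict (block : List String) : PySem.Dict String String :=
  block.foldl (fun d line => pvApplyFields pvFields d line) PySem.Dict.empty

-- keep-if-nonempty conversion of one block
def pvGB (block : List String) : Option (List (String × String)) :=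
  if (pvBlkDict block).size ≠ 0 then some (pvBlkDict block).items else none

lemma pv_sw_empty (s : String) : PySem.Str.startswith s "" = true := by
  simp [PySem.Chars.startswith_iff]

-- A's per-line update on a non-Title line equals B's field-table update of the stripped line
-- (A's last elif is dead: startswith '' is always true)
lemma pv_upd_eq (d : PySem.Dict String String) (l : String)
    (h : PySem.Str.startswith (PySem.Str.strip l) "Title:" = false) :
    pvStepA ([], d) l = ([], pvApplyFields pvFields d (PySem.Str.strip l)) := by
  simp only [pvStepA, pvApplyFields, pvFields, h, pv_sw_empty]
  split_ifs <;> simp_all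

-- A's fold: the ideas accumulator only grows by appends
lemma pv_foldA_append (ls : List String) :
    ∀ (i : List (PySem.Dict String String)) (c : PySem.Dict String String),
    ls.foldl pvStepA (i, c) =
      (i ++ (ls.foldl pvStepA ([], c)).1, (ls.foldl pvStepA ([], c)).2) := by
  induction ls with
  | nil => intro i c; simp
  | cons l ls ih =>
    intro i c
    have hstep : pvStepA (i, c) l = (i ++ (pvStepA ([], c) l).1, (pvStepA ([], c) l).2) := by
      simp only [pvStepA]
      split_ifs <;> simp
    simp only [List.foldl_cons, hstep]
    rw [ih (i ++ (pvStepA ([], c) l).1) _, ih (pvStepA ([], c) l).1 _]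
    cases h : pvStepA ([], c) l with
    | mk a b => simp

-- B's pass-1 fold: the blocks accumulator only grows by appends
lemma pv_foldSeg_append (ls : List String) :
    ∀ (bs : List (List String)) (c : List String),
    ls.foldl pvStepSeg' (bs, c) =
      (bs ++ (ls.foldl pvStepSeg' ([], c)).1, (ls.foldl pvStepSeg' ([], c)).2) := by
  induction ls with
  | nil => intro bs c; simp
  | cons l ls ih =>
    intro bs c
    have hstep : pvStepSeg' (bs, c) l =
        (bs ++ (pvStepSeg' ([], c) l).1, (pvStepSeg' ([], c) l).2) := by
      simp only [pvStepSeg', pvStepSeg]; split_ifs <;> simp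
    simp only [List.foldl_cons, hstep]
    rw [ih (bs ++ (pvStepSeg' ([], c) l).1) _, ih (pvStepSeg' ([], c) l).1 _]
    cases h : pvStepSeg' ([], c) l with
    | mk a b => simp

-- B's pass-2 fold is acc ++ filterMap
lemma pv_addBlock_filterMap (bs : List (List String)) :
    ∀ acc, bs.foldl pvAddBlock acc = acc ++ bs.filterMap pvGB := by
  induction bs with
  | nil => intro acc; simp
  | cons b bs ih =>
    intro acc
    simp only [List.foldl_cons, List.filterMap_cons, ih]
    simp only [pvAddBlock, pvGB, pvBlkDict]
    split_ifs with h <;> simp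

-- flushing one dict = converting its block
lemma pv_flush_one (blk : List String) :
    (if (pvBlkDict blk).size ≠ 0 then [pvBlkDict blk] else []).map (fun d => d.items) =
      List.filterMap pvGB [blk] := by
  by_cases h : (pvBlkDict blk).size ≠ 0 <;> simp [pvGB, h]

-- MAIN invariant: A's remaining run from state ([], dict-of-current-block) equals
-- B's conversion of the remaining segmentation.
lemma pv_main (ls : List String) :
    ∀ (blk : List String),
    (let st := ls.foldl pvStepA ([], pvBlkDict blk)
     (if st.2.size ≠ 0 then st.1 ++ [st.2] else st.1).map (fun d => d.items)) =
    (let st := ls.foldl pvStepSeg' ([], blk)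
     (st.1 ++ [st.2]).filterMap pvGB) := by
  induction ls with
  | nil =>
    intro blk
    simpa using pv_flush_one blk
  | cons l ls ih =>
    intro blk
    by_cases hT : PySem.Str.startswith (PySem.Str.strip l) "Title:" = true
    · -- Title line: A flushes current_idea, B closes the current block
      have hNew : pvBlkDict [PySem.Str.strip l] = (PySem.Dict.empty).insert "title"
          (PySem.Str.strip (PySem.Str.replace (PySem.Str.strip l) "Title:" "")) := by
        simp only [pvBlkDict, List.foldl_cons, List.foldl_nil, pvFields, pvApplyFields]
        rw [if_pos hT]
      have hA : pvStepA ([], pvBlkDict blk) l =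
          ((if (pvBlkDict blk).size ≠ 0 then [pvBlkDict blk] else []),
           pvBlkDict [PySem.Str.strip l]) := by
        simp only [pvStepA]
        rw [if_pos hT, ← hNew]
        simp
      have hB : pvStepSeg' ([], blk) l = ([blk], [PySem.Str.strip l]) := by
        simp only [pvStepSeg', pvStepSeg]
        rw [if_pos hT]
        simp
      simp only [List.foldl_cons, hA, hB]
      rw [pv_foldA_append ls _ _, pv_foldSeg_append ls [blk] [PySem.Str.strip l]]
      have hih := ih [PySem.Str.strip l]
      simp only at hih ⊢
      cases hA2 : ls.foldl pvStepA ([], pvBlkDict [PySem.Str.strip l]) with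
      | mk ai ac =>
        cases hB2 : ls.foldl pvStepSeg' ([], [PySem.Str.strip l]) with
        | mk bi bc =>
          rw [hA2, hB2] at hih
          simp only at hih
          have hsplit : (if ac.size ≠ 0
                then ((if (pvBlkDict blk).size ≠ 0 then [pvBlkDict blk] else []) ++ ai) ++ [ac]
                else (if (pvBlkDict blk).size ≠ 0 then [pvBlkDict blk] else []) ++ ai) =
              (if (pvBlkDict blk).size ≠ 0 then [pvBlkDict blk] else []) ++
                (if ac.size ≠ 0 then ai ++ [ac] else ai) := by
            split_ifs <;> simp
          rw [hsplit, List.map_append, hih, pv_flush_one]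
          cases hgb : pvGB blk <;>
            simp [List.filterMap_cons, List.filterMap_append, hgb]
    · -- non-Title line: both extend the current block/dict
      have hTf : PySem.Str.startswith (PySem.Str.strip l) "Title:" = false :=
        eq_false_of_ne_true hT
      have hA : pvStepA ([], pvBlkDict blk) l =
          ([], pvBlkDict (blk ++ [PySem.Str.strip l])) := by
        rw [pv_upd_eq _ _ hTf]
        simp only [pvBlkDict, List.foldl_append, List.foldl_cons, List.foldl_nil]
      have hB : pvStepSeg' ([], blk) l = ([], blk ++ [PySem.Str.strip l]) := by
        simp only [pvStepSeg', pvStepSeg]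
        rw [if_neg (by rw [hTf]; simp)]
      simp only [List.foldl_cons, hA, hB]
      exact ih (blk ++ [PySem.Str.strip l])

-- ===== VERDICT (by name: the statement is the Claim_ definition above) =====
theorem parse_plot_ideas_py_spec : Claim_equal_parse_plot_ideas_py := by
  intro response_text _
  unfold Spec_parse_plot_ideas_py parse_plot_ideas_py parse_plot_ideas_py_alt
  simp only
  rw [pv_addBlock_filterMap, List.foldl_map]
  have hfun : (fun (st : List (List String) × List String) (l : String) =>
      pvStepSeg st (PySem.Str.strip l)) = pvStepSeg' := rfl
  rw [hfun]
  have hm := pv_main ((PySem.Str.split? response_text "\n").getD []) []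
  simp only [pvBlkDict, List.foldl_nil] at hm
  simpa using hm
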